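-- pv_equiv track=rewrite | github.com/blackgauss/pocketpartition | pocketpartition/utils.py | remove_sum_of_two_elements
-- ===== SOURCE A (Python) =====
-- def remove_sum_of_two_elements(A):
--     to_remove = set()
--     Acopy = A.copy()
--     for x in A:
--         for y in A:
--             if (x + y) in A:
--                 to_remove.add(x+y)
--                 # break  # No need to check further once x is found to be removable
--     Acopy.difference_update(to_remove)
--     return Acopy
-- ===== SOURCE B (Python) =====
-- def remove_sum_of_two_elements(A):
--     # Keep a iff no x in A has a - x also in A (i.e. a is not a sum of two elements).
--     return {a for a in A if all(a - x not in A for x in A)}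
-- ===== Notes on version B (the rewrite author's own statement) =====
-- stated objective: faster
-- what changed: Instead of building a to_remove set by a full nested loop over all pairs and then set-subtracting it, B keeps each element a directly iff no x in A has a-x in A, a single comprehension whose per-element test short-circuits at the first witness.
import Mathlib
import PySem

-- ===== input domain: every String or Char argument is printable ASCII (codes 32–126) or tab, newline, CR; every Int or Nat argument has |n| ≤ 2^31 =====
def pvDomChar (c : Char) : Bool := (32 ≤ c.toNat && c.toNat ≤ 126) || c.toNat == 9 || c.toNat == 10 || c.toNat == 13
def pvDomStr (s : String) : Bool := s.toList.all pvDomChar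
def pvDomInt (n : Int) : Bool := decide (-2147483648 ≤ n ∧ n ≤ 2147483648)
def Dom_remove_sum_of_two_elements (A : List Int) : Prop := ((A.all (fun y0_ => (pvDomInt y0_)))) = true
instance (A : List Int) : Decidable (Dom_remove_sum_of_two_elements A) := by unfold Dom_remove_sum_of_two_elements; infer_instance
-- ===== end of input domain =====

-- B replaces A's pair-loop that accumulates a to_remove set (then set-difference) by a direct
-- per-element test "no x in A has a-x in A"; objective: simpler. Both operate on sets (List Int
-- holding the distinct elements); A mutates only a local copy, so return-value equivalence is full.

-- ===== PORT A =====
def remove_sum_of_two_elements (A : List Int) : List Int :=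
  let to_remove : PySem.Set Int :=
    A.foldl (fun tr x =>
      A.foldl (fun tr y =>
        if PySem.Set.contains A (x + y) then PySem.Set.add tr (x + y) else tr) tr)
      PySem.Set.empty
  PySem.Set.diff A to_remove

-- ===== PORT B =====
def remove_sum_of_two_elements_alt (A : List Int) : List Int :=
  A.filter (fun a => A.all (fun x => !(PySem.Set.contains A (a - x))))

-- ===== PRECONDITION & SPEC =====
def Spec_remove_sum_of_two_elements (A : List Int) (out : List Int) : Prop := out = remove_sum_of_two_elements_alt A
instance (A : List Int) (out : List Int) : Decidable (Spec_remove_sum_of_two_elements A out) := by unfold Spec_remove_sum_of_two_elements; infer_instance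

-- ===== CLAIM (what is proved, stated in full; the proofs are below) =====
def Claim_equal_remove_sum_of_two_elements : Prop := ∀ (A : List Int), Dom_remove_sum_of_two_elements A → Spec_remove_sum_of_two_elements A (remove_sum_of_two_elements A)

-- ===== LEMMAS AND PROOFS =====

-- membership in the inner loop's accumulated set
theorem mem_foldl_add_if (l tr : List Int) (P : Int → Bool) (f : Int → Int) (z : Int) :
    z ∈ l.foldl (fun tr y => if P y then PySem.Set.add tr (f y) else tr) tr ↔
      z ∈ tr ∨ ∃ y ∈ l, P y ∧ z = f y := by
  induction l generalizing tr with
  | nil => simp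
  | cons y l ih =>
    simp only [List.foldl_cons, ih, List.mem_cons]
    by_cases h : P y = true
    · simp only [h, if_true, PySem.Set.mem_add]
      constructor
      · rintro ((h1 | rfl) | ⟨w, hw, hP, rfl⟩)
        · exact Or.inl h1
        · exact Or.inr ⟨y, Or.inl rfl, h, rfl⟩
        · exact Or.inr ⟨w, Or.inr hw, hP, rfl⟩
      · rintro (h1 | ⟨w, hw | hw, hP, rfl⟩)
        · exact Or.inl (Or.inl h1)
        · subst hw; exact Or.inl (Or.inr rfl)
        · exact Or.inr ⟨w, hw, hP, rfl⟩
    · simp only [h]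
      constructor
      · rintro (h1 | ⟨w, hw, hP, rfl⟩)
        · exact Or.inl h1
        · exact Or.inr ⟨w, Or.inr hw, hP, rfl⟩
      · rintro (h1 | ⟨w, hw | hw, hP, rfl⟩)
        · exact Or.inl h1
        · subst hw; simp [hP] at h
        · exact Or.inr ⟨w, hw, hP, rfl⟩

-- membership in the nested loop's accumulated set (outer list generalized)
theorem mem_outer (A L tr : List Int) (z : Int) :
    z ∈ L.foldl (fun tr x =>
          A.foldl (fun tr y =>
            if PySem.Set.contains A (x + y) then PySem.Set.add tr (x + y) else tr) tr) tr ↔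
      z ∈ tr ∨ ∃ x ∈ L, ∃ y ∈ A, PySem.Set.contains A (x + y) ∧ z = x + y := by
  induction L generalizing tr with
  | nil => simp
  | cons a L ih =>
    simp only [List.foldl_cons, ih,
      mem_foldl_add_if A _ (fun y => PySem.Set.contains A (a + y)) (fun y => a + y) z,
      List.mem_cons]
    constructor
    · rintro ((h1 | ⟨y, hy, hP, rfl⟩) | ⟨x, hx, y, hy, hP, rfl⟩)
      · exact Or.inl h1
      · exact Or.inr ⟨a, Or.inl rfl, y, hy, hP, rfl⟩
      · exact Or.inr ⟨x, Or.inr hx, y, hy, hP, rfl⟩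
    · rintro (h1 | ⟨x, hx | hx, y, hy, hP, rfl⟩)
      · exact Or.inl (Or.inl h1)
      · subst hx; exact Or.inl (Or.inr ⟨y, hy, hP, rfl⟩)
      · exact Or.inr ⟨x, hx, y, hy, hP, rfl⟩

-- ===== VERDICT (by name: the statement is the Claim_ definition above) =====
theorem remove_sum_of_two_elements_spec : Claim_equal_remove_sum_of_two_elements := by
  intro A _
  unfold Spec_remove_sum_of_two_elements remove_sum_of_two_elements remove_sum_of_two_elements_alt
  simp only [PySem.Set.diff]
  refine List.filter_congr ?_
  intro a ha
  have hmem : a ∈ (List.foldl (fun tr x =>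
      List.foldl (fun tr y =>
        if PySem.Set.contains A (x + y) then PySem.Set.add tr (x + y) else tr) tr A) PySem.Set.empty A) ↔
      ∃ x ∈ A, a - x ∈ A := by
    rw [mem_outer]
    simp only [PySem.Set.empty, List.not_mem_nil, false_or]
    constructor
    · rintro ⟨x, hx, y, hy, hP, rfl⟩
      exact ⟨x, hx, by simpa using hy⟩
    · rintro ⟨x, hx, hy⟩
      exact ⟨x, hx, a - x, hy, by simpa [PySem.Set.contains_iff] using ha, by ring⟩
  rw [Bool.eq_iff_iff, Bool.not_eq_true', Bool.eq_false_iff, Ne, PySem.Set.contains_iff, hmem,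
    List.all_eq_true]
  push Not
  refine forall_congr' fun x => forall_congr' fun hx => ?_
  simp
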